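-- pv_equiv track=rewrite | github.com/TD-QM/College-Work | MKNguye2_4101/Phase_1/Phase1_Ver1.5.py | makeBaseBoard
-- ===== SOURCE A (Python) =====
-- def makeBaseBoard(innerLength, innerWidth, outerLength, outerWidth):
--     area = innerLength * innerWidth
--
--     baseBoard = [[0 for a in range(innerLength)] for b in range(innerWidth)]
--
--     i = 1
--     for r in range(innerWidth):
--         for c in range(innerLength):
--             baseBoard[r][c] = i
--             i += 1
--
--     actualBoard = [[0 for a in range(area)] for b in range(area)]
--
--     baseRow = 0
--     baseCol = 0
--     for outerRow in range(outerWidth):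
--         for outerCol in range(outerLength):
--             for innerRow in range(innerWidth):
--                 for innerCol in range(innerLength):
--                     baseCol = (innerCol+outerRow)%innerLength
--                     baseRow = (innerRow+outerCol)%innerWidth
--                     actualBoard[ (outerRow*innerWidth)+innerRow ][ (outerCol*innerLength)+innerCol ] = baseBoard[baseRow][baseCol] + 0
--
--     return actualBoard
-- ===== SOURCE B (Python) =====
-- def makeBaseBoard(innerLength, innerWidth, outerLength, outerWidth):
--     # area x area board; the tiling covers the first outerWidth*innerWidth rows
--     # and outerLength*innerLength columns, every cell beyond that stays empty (0).
--     area = innerLength * innerWidth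
--     tiledRows = outerWidth * innerWidth
--     tiledCols = outerLength * innerLength
--
--     def cell(r, c):
--         outerRow, innerRow = divmod(r, innerWidth)
--         outerCol, innerCol = divmod(c, innerLength)
--         return ((innerRow + outerCol) % innerWidth) * innerLength \
--              + (innerCol + outerRow) % innerLength + 1
--
--     return [[cell(r, c) if r < tiledRows and c < tiledCols else 0
--              for c in range(area)] for r in range(area)]
-- ===== Notes on version B (the rewrite author's own statement) =====
-- stated objective: alternative
-- what changed: Replaces the mutable base-table build plus quadruple stamping loops with a single comprehension computing every cell directly from a closed-form divmod formula; Pre_ additionally excludes inputs with all four dimensions negative, where A's all-zero board is an accident of its empty loop ranges (outside the natural domain of positive dimensions), and inputs where A raises IndexError.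
-- outside the precondition, e.g. on makeBaseBoard(-1, -1, -1, -1): A returns [[0]], B returns [[1]]
import Mathlib
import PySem

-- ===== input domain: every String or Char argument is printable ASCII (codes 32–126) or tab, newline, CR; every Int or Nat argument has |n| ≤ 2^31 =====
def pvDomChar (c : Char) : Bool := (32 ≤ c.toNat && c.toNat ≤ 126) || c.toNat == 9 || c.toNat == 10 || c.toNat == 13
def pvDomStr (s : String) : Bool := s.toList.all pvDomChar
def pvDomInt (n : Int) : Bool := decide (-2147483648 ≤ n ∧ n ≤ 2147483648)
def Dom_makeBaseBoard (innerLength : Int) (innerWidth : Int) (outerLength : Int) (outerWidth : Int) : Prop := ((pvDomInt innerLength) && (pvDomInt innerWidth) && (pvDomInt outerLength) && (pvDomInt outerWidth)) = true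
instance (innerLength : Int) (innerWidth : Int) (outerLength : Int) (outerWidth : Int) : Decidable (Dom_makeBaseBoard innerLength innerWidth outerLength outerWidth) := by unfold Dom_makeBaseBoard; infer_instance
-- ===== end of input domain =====

-- B replaces A's mutable base-table build and quadruple stamping loops by a single comprehension
-- computing each cell from a closed-form divmod formula (objective: alternative, same asymptotic cost).


-- ===== PORT A =====
-- A-side helpers: `board[r][c] = v` (write; Python raises IndexError out of range — such writes are
-- excluded by Pre_; the total pySetD is a no-op there) and `board[r][c]` (read; in A every executed
-- read is in range, pyGetD's default is never used).
def wrI (b : List (List Int)) (r c v : Int) : List (List Int) :=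
  PySem.List.pySetD b r (PySem.List.pySetD (PySem.List.pyGetD b r []) c v)

def cellAtI (b : List (List Int)) (r c : Int) : Int :=
  PySem.List.pyGetD (PySem.List.pyGetD b r []) c 0

-- [[0 for a in range(cols)] for b in range(rows)]
def zeros2 (rows cols : Int) : List (List Int) :=
  (PySem.List.pyRange 0 rows 1).map (fun _ => (PySem.List.pyRange 0 cols 1).map (fun _ => (0 : Int)))

-- i = 1; for r in range(innerWidth): for c in range(innerLength): baseBoard[r][c] = i; i += 1
def mkBaseSt (innerLength innerWidth : Int) : List (List Int) × Int :=
  (PySem.List.pyRange 0 innerWidth 1).foldl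
    (fun st r => (PySem.List.pyRange 0 innerLength 1).foldl
      (fun st c => (wrI st.1 r c st.2, st.2 + 1)) st)
    (zeros2 innerWidth innerLength, 1)

def makeBaseBoard (innerLength : Int) (innerWidth : Int) (outerLength : Int) (outerWidth : Int) : List (List Int) :=
  let area := innerLength * innerWidth
  let baseBoard := (mkBaseSt innerLength innerWidth).1
  (PySem.List.pyRange 0 outerWidth 1).foldl (fun acc outerRow =>
    (PySem.List.pyRange 0 outerLength 1).foldl (fun acc outerCol =>
      (PySem.List.pyRange 0 innerWidth 1).foldl (fun acc innerRow =>
        (PySem.List.pyRange 0 innerLength 1).foldl (fun acc innerCol =>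
          wrI acc (outerRow * innerWidth + innerRow) (outerCol * innerLength + innerCol)
            (cellAtI baseBoard (PySem.Int.mod (innerRow + outerCol) innerWidth)
                               (PySem.Int.mod (innerCol + outerRow) innerLength) + 0))
          acc) acc) acc)
    (zeros2 area area)

-- ===== PORT B =====
def makeBaseBoard_alt (innerLength : Int) (innerWidth : Int) (outerLength : Int) (outerWidth : Int) : List (List Int) :=
  let area := innerLength * innerWidth
  let tiledRows := outerWidth * innerWidth
  let tiledCols := outerLength * innerLength
  let cell : Int → Int → Int := fun r c =>
    let outerRow := PySem.Int.floordiv r innerWidth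
    let innerRow := PySem.Int.mod r innerWidth
    let outerCol := PySem.Int.floordiv c innerLength
    let innerCol := PySem.Int.mod c innerLength
    PySem.Int.mod (innerRow + outerCol) innerWidth * innerLength
      + PySem.Int.mod (innerCol + outerRow) innerLength + 1
  (PySem.List.pyRange 0 area 1).map (fun r => (PySem.List.pyRange 0 area 1).map (fun c =>
    if decide (r < tiledRows) && decide (c < tiledCols) then cell r c else 0))

-- ===== PRECONDITION & SPEC =====
-- Pre_ excludes (a) the inputs on which the Python A raises IndexError (all four dimensions positive
-- but the stamped region exceeds the area×area grid), and (b) the inputs with all four dimensions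
-- negative — outside the natural domain of positive dimensions — where A's all-zero board is an
-- accident of its empty loop ranges.
def Pre_makeBaseBoard (innerLength : Int) (innerWidth : Int) (outerLength : Int) (outerWidth : Int) : Prop :=
  ¬ (innerLength < 0 ∧ innerWidth < 0 ∧ outerLength < 0 ∧ outerWidth < 0) ∧
  ((innerLength ≤ 0 ∨ innerWidth ≤ 0 ∨ outerLength ≤ 0 ∨ outerWidth ≤ 0) ∨
   (outerWidth ≤ innerLength ∧ outerLength ≤ innerWidth))
instance (innerLength : Int) (innerWidth : Int) (outerLength : Int) (outerWidth : Int) : Decidable (Pre_makeBaseBoard innerLength innerWidth outerLength outerWidth) := by unfold Pre_makeBaseBoard; infer_instance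
def pvWitness_makeBaseBoard : Int × Int × Int × Int := (2, 3, 2, 2)

def Spec_makeBaseBoard (innerLength : Int) (innerWidth : Int) (outerLength : Int) (outerWidth : Int) (out : List (List Int)) : Prop := out = makeBaseBoard_alt innerLength innerWidth outerLength outerWidth
instance (innerLength : Int) (innerWidth : Int) (outerLength : Int) (outerWidth : Int) (out : List (List Int)) : Decidable (Spec_makeBaseBoard innerLength innerWidth outerLength outerWidth out) := by unfold Spec_makeBaseBoard; infer_instance

-- ===== CLAIM =====
def Claim_equal_makeBaseBoard : Prop := ∀ (innerLength : Int) (innerWidth : Int) (outerLength : Int) (outerWidth : Int), Dom_makeBaseBoard innerLength innerWidth outerLength outerWidth → Pre_makeBaseBoard innerLength innerWidth outerLength outerWidth → Spec_makeBaseBoard innerLength innerWidth outerLength outerWidth (makeBaseBoard innerLength innerWidth outerLength outerWidth)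

-- ===== LEMMAS AND PROOFS =====

-- sequential writes board := write(board, r, c, v) over a list of (row, col, value) operations
def applyW (b : List (List Int)) (ops : List (Int × Int × Int)) : List (List Int) :=
  ops.foldl (fun b op => wrI b op.1 op.2.1 op.2.2) b

def Rect (b : List (List Int)) (N M : Nat) : Prop :=
  b.length = N ∧ ∀ row ∈ b, row.length = M

def GoodOp (N M : Nat) (op : Int × Int × Int) : Prop :=
  0 ≤ op.1 ∧ op.1 < (N : Int) ∧ 0 ≤ op.2.1 ∧ op.2.1 < (M : Int)

-- the op list the quadruple loop of A performs
def opsA (l w ol ow : Int) : List (Int × Int × Int) :=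
  (PySem.List.pyRange 0 ow 1).flatMap fun oR =>
  (PySem.List.pyRange 0 ol 1).flatMap fun oC =>
  (PySem.List.pyRange 0 w 1).flatMap fun iR =>
  (PySem.List.pyRange 0 l 1).map fun iC =>
    (oR * w + iR, oC * l + iC,
      cellAtI (mkBaseSt l w).1 (PySem.Int.mod (iR + oC) w) (PySem.Int.mod (iC + oR) l) + 0)


theorem foldl_ext {σ α : Type} (f g : σ → α → σ) (h : ∀ s a, f s a = g s a) (l : List α) (s : σ) :
    l.foldl f s = l.foldl g s := by
  have hfg : f = g := funext fun s => funext fun a => h s a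
  rw [hfg]

theorem applyW_append (b : List (List Int)) (o1 o2 : List (Int × Int × Int)) :
    applyW b (o1 ++ o2) = applyW (applyW b o1) o2 := List.foldl_append ..

theorem applyW_map_eq_foldl {β : Type} (xs : List β) (f : β → Int × Int × Int) (b : List (List Int)) :
    applyW b (xs.map f) = xs.foldl (fun s x => wrI s (f x).1 (f x).2.1 (f x).2.2) b := by
  simp [applyW, List.foldl_map]

theorem foldl_applyW {α : Type} (l1 : List α) (f : α → List (Int × Int × Int)) (b : List (List Int)) :
    l1.foldl (fun s a => applyW s (f a)) b = applyW b (l1.flatMap f) := by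
  induction l1 generalizing b with
  | nil => rfl
  | cons a t ih => simp [List.flatMap_cons, applyW_append, ih]

theorem foldA_eq (l w ol ow : Int) :
    makeBaseBoard l w ol ow = applyW (zeros2 (l * w) (l * w)) (opsA l w ol ow) := by
  unfold makeBaseBoard opsA
  dsimp only
  refine Eq.trans ?_ (foldl_applyW _ _ _)
  apply foldl_ext; intro s oR
  refine Eq.trans ?_ (foldl_applyW _ _ _)
  apply foldl_ext; intro s oC
  refine Eq.trans ?_ (foldl_applyW _ _ _)
  apply foldl_ext; intro s iR
  exact (applyW_map_eq_foldl (PySem.List.pyRange 0 l 1)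
    (fun iC => (oR * w + iR, oC * l + iC,
      cellAtI (mkBaseSt l w).1 (PySem.Int.mod (iR + oC) w) (PySem.Int.mod (iC + oR) l) + 0)) s).symm

theorem pyGetD_nonneg {α : Type} (xs : List α) (i : Int) (d : α) (h : 0 ≤ i) :
    PySem.List.pyGetD xs i d = xs.getD i.toNat d := by
  have := PySem.List.pyGetD_natCast (xs := xs) (n := i.toNat) (d := d)
  rwa [Int.toNat_of_nonneg h] at this

theorem getD_set_getD {α : Type} (xs : List α) (i j : Nat) (v d : α) (h : i < xs.length) :
    (xs.set i v).getD j d = if j = i then v else xs.getD j d := by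
  by_cases hj : j = i
  · subst hj
    rw [List.getD_eq_getElem?_getD, List.getElem?_set_self h, Option.getD_some, if_pos rfl]
  · rw [if_neg hj, List.getD_eq_getElem?_getD, List.getElem?_set_ne (by omega),
        ← List.getD_eq_getElem?_getD]

theorem cellAtI_wrI (b : List (List Int)) (r c v R C : Int)
    (hr0 : 0 ≤ r) (hc0 : 0 ≤ c) (hR : 0 ≤ R) (hC : 0 ≤ C)
    (hrb : r.toNat < b.length) (hcb : c.toNat < (b.getD r.toNat []).length) :
    cellAtI (wrI b r c v) R C = if R = r ∧ C = c then v else cellAtI b R C := by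
  unfold cellAtI wrI
  have hsetr : ∀ (xs : List (List Int)) (u : List Int),
      PySem.List.pySetD xs r u = xs.set r.toNat u := fun xs u => PySem.List.pySetD_of_nonneg xs u hr0
  have hsetc : ∀ (xs : List Int) (u : Int),
      PySem.List.pySetD xs c u = xs.set c.toNat u := fun xs u => PySem.List.pySetD_of_nonneg xs u hc0
  have hgr : ∀ (xs : List (List Int)) (d : List Int),
      PySem.List.pyGetD xs r d = xs.getD r.toNat d := fun xs d => pyGetD_nonneg xs r d hr0
  have hgR : ∀ (xs : List (List Int)) (d : List Int),
      PySem.List.pyGetD xs R d = xs.getD R.toNat d := fun xs d => pyGetD_nonneg xs R d hR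
  have hgC : ∀ (xs : List Int) (d : Int),
      PySem.List.pyGetD xs C d = xs.getD C.toNat d := fun xs d => pyGetD_nonneg xs C d hC
  simp only [hsetr, hsetc, hgr, hgR, hgC]
  rw [getD_set_getD b r.toNat R.toNat _ [] hrb]
  by_cases hRr : R = r
  · have hnn : R.toNat = r.toNat := by omega
    rw [if_pos hnn, getD_set_getD _ c.toNat C.toNat v 0 hcb]
    by_cases hCc : C = c
    · rw [if_pos (by omega), if_pos ⟨hRr, hCc⟩]
    · rw [if_neg (by omega), if_neg (by tauto), hnn]
  · rw [if_neg (by omega), if_neg (by tauto)]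

theorem length_wrI (b : List (List Int)) (r c v : Int) : (wrI b r c v).length = b.length := by
  simp [wrI, PySem.List.length_pySetD]

theorem rect_wrI {b : List (List Int)} {N M : Nat} (hrect : Rect b N M)
    {r : Int} (c v : Int) (hr0 : 0 ≤ r) (hrb : r < (N : Int)) :
    Rect (wrI b r c v) N M := by
  obtain ⟨hlen, hrows⟩ := hrect
  refine ⟨by rw [length_wrI, hlen], ?_⟩
  intro row hmem
  unfold wrI at hmem
  rw [PySem.List.pySetD_of_nonneg _ _ hr0] at hmem
  rcases List.mem_or_eq_of_mem_set hmem with h | h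
  · exact hrows row h
  · subst h
    rw [PySem.List.length_pySetD, pyGetD_nonneg _ _ _ hr0]
    have hb : r.toNat < b.length := by rw [hlen]; omega
    rw [List.getD_eq_getElem _ _ hb]
    exact hrows _ (List.getElem_mem hb)

theorem length_applyW (b : List (List Int)) (ops : List (Int × Int × Int)) :
    (applyW b ops).length = b.length := by
  induction ops generalizing b with
  | nil => rfl
  | cons op t ih => simpa [applyW, length_wrI] using ih (wrI b op.1 op.2.1 op.2.2)

theorem rect_applyW {b : List (List Int)} {N M : Nat} (hrect : Rect b N M)
    {ops : List (Int × Int × Int)} (hops : ∀ op ∈ ops, GoodOp N M op) :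
    Rect (applyW b ops) N M := by
  induction ops generalizing b with
  | nil => exact hrect
  | cons op t ih =>
    exact ih (rect_wrI hrect op.2.1 op.2.2 (hops op (by simp)).1 (hops op (by simp)).2.1)
        (fun o ho => hops o (by simp [ho]))

theorem cellAtI_applyW (ops : List (Int × Int × Int)) (b : List (List Int)) (N M : Nat) (R C : Int)
    (hrect : Rect b N M) (hops : ∀ op ∈ ops, GoodOp N M op) (hR : 0 ≤ R) (hC : 0 ≤ C) :
    cellAtI (applyW b ops) R C =
      ((ops.reverse.find? (fun op => op.1 == R && op.2.1 == C)).map (fun op => op.2.2)).getD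
        (cellAtI b R C) := by
  induction ops generalizing b with
  | nil => simp [applyW]
  | cons op t ih =>
    obtain ⟨ho1, ho2, ho3, ho4⟩ := hops op (List.mem_cons_self ..)
    have h1 : op.1.toNat < b.length := by rw [hrect.1]; omega
    have h2 : op.2.1.toNat < (b.getD op.1.toNat []).length := by
      rw [List.getD_eq_getElem _ _ h1, hrect.2 _ (List.getElem_mem h1)]
      omega
    have hstep : applyW b (op :: t) = applyW (wrI b op.1 op.2.1 op.2.2) t := rfl
    rw [hstep, ih (wrI b op.1 op.2.1 op.2.2) (rect_wrI hrect _ _ ho1 ho2)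
          (fun o ho => hops o (List.mem_cons_of_mem _ ho)),
        List.reverse_cons, List.find?_append,
        cellAtI_wrI b op.1 op.2.1 op.2.2 R C ho1 ho3 hR hC h1 h2]
    cases hfind : t.reverse.find? (fun o => o.1 == R && o.2.1 == C) with
    | some o => simp
    | none =>
      simp only [Option.none_or]
      by_cases h : R = op.1 ∧ C = op.2.1
      · simp [h.1, h.2]
      · have hb : (op.1 == R && op.2.1 == C) = false := by
          simp only [Bool.and_eq_false_iff, beq_eq_false_iff_ne, ne_eq]
          tauto
        simp [hb, h]

theorem cellAtI_applyW_found (ops : List (Int × Int × Int)) (b : List (List Int)) (N M : Nat)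
    (R C v : Int) (hrect : Rect b N M) (hops : ∀ op ∈ ops, GoodOp N M op) (hR : 0 ≤ R) (hC : 0 ≤ C)
    (hex : ∃ op ∈ ops, op.1 = R ∧ op.2.1 = C)
    (huniq : ∀ op ∈ ops, op.1 = R → op.2.1 = C → op.2.2 = v) :
    cellAtI (applyW b ops) R C = v := by
  rw [cellAtI_applyW ops b N M R C hrect hops hR hC]
  have hsome : (ops.reverse.find? (fun op => op.1 == R && op.2.1 == C)).isSome := by
    rw [List.find?_isSome]
    obtain ⟨op, hmem, h1, h2⟩ := hex
    exact ⟨op, List.mem_reverse.mpr hmem, by simp [h1, h2]⟩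
  obtain ⟨op, hfind⟩ := Option.isSome_iff_exists.mp hsome
  have hp := List.find?_some hfind
  have hmem := List.mem_reverse.mp (List.mem_of_find?_eq_some hfind)
  simp only [Bool.and_eq_true, beq_iff_eq] at hp
  rw [hfind]
  simpa using huniq op hmem hp.1 hp.2

theorem cellAtI_applyW_none (ops : List (Int × Int × Int)) (b : List (List Int)) (N M : Nat)
    (R C : Int) (hrect : Rect b N M) (hops : ∀ op ∈ ops, GoodOp N M op) (hR : 0 ≤ R) (hC : 0 ≤ C)
    (hnone : ∀ op ∈ ops, ¬(op.1 = R ∧ op.2.1 = C)) :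
    cellAtI (applyW b ops) R C = cellAtI b R C := by
  rw [cellAtI_applyW ops b N M R C hrect hops hR hC]
  have : ops.reverse.find? (fun op => op.1 == R && op.2.1 == C) = none := by
    rw [List.find?_eq_none]
    intro op hmem
    have := hnone op (List.mem_reverse.mp hmem)
    simp only [Bool.and_eq_true, beq_iff_eq]
    tauto
  simp [this]

theorem rect_zeros2 (n m : Int) : Rect (zeros2 n m) n.toNat m.toNat := by
  constructor
  · simp [zeros2, PySem.List.length_pyRange_one]
  · intro row h
    simp only [zeros2, List.mem_map] at h
    obtain ⟨x, -, rfl⟩ := h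
    simp [PySem.List.length_pyRange_one]

theorem cellAtI_zeros2 (rows cols R C : Int) (hR : 0 ≤ R) (hC : 0 ≤ C) :
    cellAtI (zeros2 rows cols) R C = 0 := by
  unfold cellAtI zeros2
  rw [pyGetD_nonneg _ _ _ hR, pyGetD_nonneg _ _ _ hC]
  simp only [List.getD_eq_getElem?_getD, List.getElem?_map]
  cases h : (PySem.List.pyRange 0 rows 1)[R.toNat]? with
  | none => simp
  | some a =>
    simp only [Option.map_some, Option.getD_some]
    cases h2 : (PySem.List.pyRange 0 cols 1)[C.toNat]? with
    | none => simp
    | some b => simp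

theorem rowfold (L : Nat) (r i : Int) (b : List (List Int)) :
    (PySem.List.pyRange 0 (L : Int) 1).foldl (fun st c => (wrI st.1 r c st.2, st.2 + 1)) (b, i)
      = (applyW b ((PySem.List.pyRange 0 (L : Int) 1).map (fun c => (r, c, i + c))), i + L) := by
  induction L with
  | zero => simp [PySem.List.pyRange_one_eq_nil, applyW]
  | succ k ih =>
    have hcast : ((k + 1 : Nat) : Int) = (k : Int) + 1 := by push_cast; ring
    rw [hcast, PySem.List.pyRange_one_succ_right (by positivity), List.foldl_append, ih,
        List.map_append, applyW_append]
    simp only [List.foldl_cons, List.foldl_nil, List.map_cons, List.map_nil]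
    refine Prod.ext ?_ ?_
    · simp [applyW]
    · simp; ring

theorem colfold (L W : Nat) (i : Int) (b : List (List Int)) :
    (PySem.List.pyRange 0 (W : Int) 1).foldl
        (fun st r => (PySem.List.pyRange 0 (L : Int) 1).foldl
          (fun st c => (wrI st.1 r c st.2, st.2 + 1)) st) (b, i)
      = (applyW b ((PySem.List.pyRange 0 (W : Int) 1).flatMap
          (fun r => (PySem.List.pyRange 0 (L : Int) 1).map (fun c => (r, c, i + r * L + c)))),
         i + W * L) := by
  induction W generalizing b with
  | zero => simp [PySem.List.pyRange_one_eq_nil, applyW]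
  | succ k ih =>
    have hcast : ((k + 1 : Nat) : Int) = (k : Int) + 1 := by push_cast; ring
    rw [hcast, PySem.List.pyRange_one_succ_right (by positivity), List.foldl_append, ih,
        List.flatMap_append]
    simp only [List.foldl_cons, List.foldl_nil, List.flatMap_cons, List.flatMap_nil,
      List.append_nil]
    rw [applyW_append, rowfold L (k : Int) (i + (k : Int) * (L : Int)) _]
    refine Prod.ext rfl ?_
    simp; ring

theorem mkBase_cell (L W : Nat) (r c : Int)
    (hr : 0 ≤ r) (hrW : r < (W : Int)) (hc : 0 ≤ c) (hcL : c < (L : Int)) :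
    cellAtI (mkBaseSt (L : Int) (W : Int)).1 r c = r * L + c + 1 := by
  unfold mkBaseSt
  rw [colfold L W 1 (zeros2 (W : Int) (L : Int))]
  have hrect : Rect (zeros2 (W : Int) (L : Int)) W L := by
    simpa using rect_zeros2 (W : Int) (L : Int)
  apply cellAtI_applyW_found _ _ W L _ _ _ hrect ?_ hr hc ?_ ?_
  · intro op hop
    simp only [List.mem_flatMap, List.mem_map, PySem.List.mem_pyRange_one] at hop
    obtain ⟨r', hr', c', hc', rfl⟩ := hop
    exact ⟨hr'.1, hr'.2, hc'.1, hc'.2⟩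
  · refine ⟨(r, c, 1 + r * (L : Int) + c), ?_, rfl, rfl⟩
    simp only [List.mem_flatMap, List.mem_map, PySem.List.mem_pyRange_one]
    exact ⟨r, ⟨hr, hrW⟩, c, ⟨hc, hcL⟩, rfl⟩
  · intro op hop h1 h2
    simp only [List.mem_flatMap, List.mem_map, PySem.List.mem_pyRange_one] at hop
    obtain ⟨r', hr', c', hc', rfl⟩ := hop
    simp only at h1 h2
    subst h1; subst h2
    ring

theorem eq_of_cellAtI (b : List (List Int)) (n : Int) (f : Int → Int → Int)
    (hlen : b.length = n.toNat) (hrows : ∀ row ∈ b, row.length = n.toNat)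
    (hcell : ∀ R C : Int, 0 ≤ R → R < n → 0 ≤ C → C < n → cellAtI b R C = f R C) :
    b = (PySem.List.pyRange 0 n 1).map
        (fun R => (PySem.List.pyRange 0 n 1).map (fun C => f R C)) := by
  apply List.ext_getElem
  · simp [PySem.List.length_pyRange_one, hlen]
  · intro i h1 h2
    have hrl : b[i].length = n.toNat := hrows _ (List.getElem_mem h1)
    apply List.ext_getElem
    · simp [List.getElem_map, PySem.List.length_pyRange_one, hrl]
    · intro j hj1 hj2
      have hin : (i : Int) < n := by
        rw [hlen] at h1; omega
      have hjn : (j : Int) < n := by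
        rw [hrl] at hj1; omega
      have hc := hcell i j (by positivity) hin (by positivity) hjn
      unfold cellAtI at hc
      rw [pyGetD_nonneg _ _ _ (by positivity), pyGetD_nonneg _ _ _ (by positivity)] at hc
      simp only [Int.toNat_natCast] at hc
      rw [List.getD_eq_getElem _ _ h1, List.getD_eq_getElem _ _ hj1] at hc
      rw [hc]
      simp [List.getElem_map, PySem.List.getElem_pyRange_one]

def cellB (l w ol ow R C : Int) : Int :=
  if decide (R < ow * w) && decide (C < ol * l) then
    PySem.Int.mod (PySem.Int.mod R w + PySem.Int.floordiv C l) w * l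
      + PySem.Int.mod (PySem.Int.mod C l + PySem.Int.floordiv R w) l + 1
  else 0

theorem altB_eq (l w ol ow : Int) :
    makeBaseBoard_alt l w ol ow = (PySem.List.pyRange 0 (l * w) 1).map
      (fun R => (PySem.List.pyRange 0 (l * w) 1).map (fun C => cellB l w ol ow R C)) := rfl

theorem mem_opsA (l w ol ow : Int) (op : Int × Int × Int) :
    op ∈ opsA l w ol ow ↔ ∃ oR oC iR iC : Int,
      (0 ≤ oR ∧ oR < ow) ∧ (0 ≤ oC ∧ oC < ol) ∧ (0 ≤ iR ∧ iR < w) ∧ (0 ≤ iC ∧ iC < l) ∧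
      op = (oR * w + iR, oC * l + iC,
        cellAtI (mkBaseSt l w).1 (PySem.Int.mod (iR + oC) w) (PySem.Int.mod (iC + oR) l) + 0) := by
  simp only [opsA, List.mem_flatMap, List.mem_map, PySem.List.mem_pyRange_one]
  constructor
  · rintro ⟨oR, hoR, oC, hoC, iR, hiR, iC, hiC, rfl⟩
    exact ⟨oR, oC, iR, iC, by omega, by omega, by omega, by omega, rfl⟩
  · rintro ⟨oR, oC, iR, iC, h1, h2, h3, h4, rfl⟩
    exact ⟨oR, by omega, oC, by omega, iR, by omega, iC, by omega, rfl⟩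

-- under Pre_, a cell in range with both tiling bounds satisfied forces all dimensions positive
theorem pos_of_covered (l w ol ow R C : Int)
    (hpre : Pre_makeBaseBoard l w ol ow)
    (hR0 : 0 ≤ R) (hRn : R < l * w) (hC0 : 0 ≤ C)
    (hRr : R < ow * w) (hCr : C < ol * l) :
    0 < l ∧ 0 < w ∧ 0 < ol ∧ 0 < ow := by
  have hlw : 0 < l * w := lt_of_le_of_lt hR0 hRn
  have howw : 0 < ow * w := lt_of_le_of_lt hR0 hRr
  have holl : 0 < ol * l := lt_of_le_of_lt hC0 hCr
  rcases mul_pos_iff.mp hlw with ⟨hl, hw⟩ | ⟨hl, hw⟩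
  · rcases mul_pos_iff.mp howw with ⟨how, -⟩ | ⟨-, hw'⟩
    · rcases mul_pos_iff.mp holl with ⟨hol, -⟩ | ⟨-, hl'⟩
      · exact ⟨hl, hw, hol, how⟩
      · omega
    · omega
  · rcases mul_pos_iff.mp howw with ⟨-, hw'⟩ | ⟨how, -⟩
    · omega
    · rcases mul_pos_iff.mp holl with ⟨-, hl'⟩ | ⟨hol, -⟩
      · omega
      · exact absurd ⟨hl, hw, hol, how⟩ hpre.1

-- ===== VERDICT =====
theorem makeBaseBoard_spec : Claim_equal_makeBaseBoard := by
  intro l w ol ow _ hpre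
  unfold Spec_makeBaseBoard
  rw [foldA_eq, altB_eq]
  have hgood : ∀ op ∈ opsA l w ol ow, GoodOp (l * w).toNat (l * w).toNat op := by
    intro op hop
    rw [mem_opsA] at hop
    obtain ⟨oR, oC, iR, iC, hoR, hoC, hiR, hiC, rfl⟩ := hop
    have hw : 0 < w := by omega
    have hl : 0 < l := by omega
    have hle : ow ≤ l ∧ ol ≤ w := by
      unfold Pre_makeBaseBoard at hpre; omega
    have harea : (((l * w).toNat : Int)) = l * w :=
      Int.toNat_of_nonneg (mul_nonneg hl.le hw.le)
    have t1 := mul_le_mul_of_nonneg_right (show oR + 1 ≤ ow by omega) hw.le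
    have t2 := mul_le_mul_of_nonneg_right (show ow ≤ l from hle.1) hw.le
    have t3 := mul_le_mul_of_nonneg_right (show oC + 1 ≤ ol by omega) hl.le
    have t4 := mul_le_mul_of_nonneg_right (show ol ≤ w from hle.2) hl.le
    refine ⟨by nlinarith [mul_nonneg hoR.1 hw.le], by rw [harea]; nlinarith,
            by nlinarith [mul_nonneg hoC.1 hl.le], by rw [harea]; nlinarith⟩
  refine eq_of_cellAtI _ (l * w) (cellB l w ol ow) ?_ ?_ ?_
  · rw [length_applyW]; exact (rect_zeros2 _ _).1
  · exact (rect_applyW (rect_zeros2 _ _) hgood).2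
  · intro R C hR0 hRn hC0 hCn
    by_cases hreg : R < ow * w ∧ C < ol * l
    · obtain ⟨hRr, hCr⟩ := hreg
      obtain ⟨hl, hw, hol, how⟩ := pos_of_covered l w ol ow R C hpre hR0 hRn hC0 hRr hCr
      have hBcond : cellB l w ol ow R C =
          PySem.Int.mod (PySem.Int.mod R w + PySem.Int.floordiv C l) w * l
            + PySem.Int.mod (PySem.Int.mod C l + PySem.Int.floordiv R w) l + 1 := by
        unfold cellB
        rw [if_pos (by simp [hRr, hCr])]
      apply cellAtI_applyW_found _ _ (l * w).toNat (l * w).toNat _ _ _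
          (rect_zeros2 _ _) hgood hR0 hC0
      · refine ⟨_, (mem_opsA l w ol ow _).mpr
          ⟨R / w, C / l, R % w, C % l,
            ⟨Int.ediv_nonneg hR0 hw.le, (Int.ediv_lt_iff_lt_mul hw).mpr hRr⟩,
            ⟨Int.ediv_nonneg hC0 hl.le, (Int.ediv_lt_iff_lt_mul hl).mpr hCr⟩,
            ⟨Int.emod_nonneg R (by omega), Int.emod_lt_of_pos R hw⟩,
            ⟨Int.emod_nonneg C (by omega), Int.emod_lt_of_pos C hl⟩, rfl⟩, ?_, ?_⟩
        · show R / w * w + R % w = R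
          calc R / w * w + R % w = R % w + w * (R / w) := by ring
            _ = R := Int.emod_add_mul_ediv R w
        · show C / l * l + C % l = C
          calc C / l * l + C % l = C % l + l * (C / l) := by ring
            _ = C := Int.emod_add_mul_ediv C l
      · intro op hop h1 h2
        rw [mem_opsA] at hop
        obtain ⟨oR, oC, iR, iC, hoR, hoC, hiR, hiC, rfl⟩ := hop
        simp only at h1 h2
        have e1 : R % w = iR := by
          rw [← h1, show oR * w + iR = iR + w * oR from by ring,
              Int.add_mul_emod_self_left, Int.emod_eq_of_lt hiR.1 hiR.2]
        have e2 : R / w = oR := by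
          rw [← h1, show oR * w + iR = iR + oR * w from by ring,
              Int.add_mul_ediv_right _ _ (by omega : w ≠ 0),
              Int.ediv_eq_zero_of_lt hiR.1 hiR.2]
          ring
        have e3 : C % l = iC := by
          rw [← h2, show oC * l + iC = iC + l * oC from by ring,
              Int.add_mul_emod_self_left, Int.emod_eq_of_lt hiC.1 hiC.2]
        have e4 : C / l = oC := by
          rw [← h2, show oC * l + iC = iC + oC * l from by ring,
              Int.add_mul_ediv_right _ _ (by omega : l ≠ 0),
              Int.ediv_eq_zero_of_lt hiC.1 hiC.2]
          ring
        show cellAtI (mkBaseSt l w).1 (PySem.Int.mod (iR + oC) w)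
            (PySem.Int.mod (iC + oR) l) + 0 = cellB l w ol ow R C
        rw [add_zero, hBcond]
        simp only [PySem.Int.mod_eq_emod_of_pos hw, PySem.Int.mod_eq_emod_of_pos hl,
          PySem.Int.floordiv_eq_ediv_of_pos hw, PySem.Int.floordiv_eq_ediv_of_pos hl]
        rw [e1, e2, e3, e4]
        have hl' : ((l.toNat : Nat) : Int) = l := Int.toNat_of_nonneg hl.le
        have hw' : ((w.toNat : Nat) : Int) = w := Int.toNat_of_nonneg hw.le
        have hmc := mkBase_cell l.toNat w.toNat ((iR + oC) % w) ((iC + oR) % l)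
          (Int.emod_nonneg _ (by omega)) (by rw [hw']; exact Int.emod_lt_of_pos _ hw)
          (Int.emod_nonneg _ (by omega)) (by rw [hl']; exact Int.emod_lt_of_pos _ hl)
        rw [hl', hw'] at hmc
        exact hmc
    · have hz : cellB l w ol ow R C = 0 := by
        unfold cellB
        rw [if_neg]
        intro hcond
        simp only [Bool.and_eq_true, decide_eq_true_eq] at hcond
        exact hreg hcond
      rw [hz, cellAtI_applyW_none _ _ (l * w).toNat (l * w).toNat _ _
            (rect_zeros2 _ _) hgood hR0 hC0 ?_]
      · exact cellAtI_zeros2 _ _ _ _ hR0 hC0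
      · intro op hop hmatch
        rw [mem_opsA] at hop
        obtain ⟨oR, oC, iR, iC, hoR, hoC, hiR, hiC, rfl⟩ := hop
        simp only at hmatch
        obtain ⟨h1, h2⟩ := hmatch
        have hw : 0 < w := by omega
        have hl : 0 < l := by omega
        have t1 := mul_le_mul_of_nonneg_right (show oR + 1 ≤ ow by omega) hw.le
        have t3 := mul_le_mul_of_nonneg_right (show oC + 1 ≤ ol by omega) hl.le
        have hR' : R < ow * w := by rw [← h1]; nlinarith
        have hC' : C < ol * l := by rw [← h2]; nlinarith
        exact hreg ⟨hR', hC'⟩
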